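-- pv_equiv track=rewrite | github.com/genevrahenrike/subreddit-scrapper | analyze_keyword_quality.py | find_word_repetitions
-- ===== SOURCE A (Python) =====
-- from collections import defaultdict, Counter
--
-- def find_word_repetitions(terms):
--     """Find terms with repeated words."""
--     repeated = []
--     for term in terms:
--         words = term.lower().split()
--         if len(set(words)) < len(words):
--             # Check if it's a meaningful repetition (not just articles/prepositions)
--             word_counts = Counter(words)
--             meaningful_reps = [word for word, count in word_counts.items()
--                              if count > 1 and len(word) > 2 and word not in ['the', 'and', 'or', 'of', 'in', 'to']]
--             if meaningful_reps:
--                 repeated.append(term)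
--     return repeated
-- ===== SOURCE B (Python) =====
-- def find_word_repetitions(terms):
--     """Find terms with repeated words (single early-exit pass per term)."""
--     stop = ['the', 'and', 'or', 'of', 'in', 'to']
--     repeated = []
--     for term in terms:
--         seen = set()
--         for word in term.lower().split():
--             if len(word) > 2 and word not in stop:
--                 if word in seen:
--                     repeated.append(term)
--                     break
--                 seen.add(word)
--     return repeated
-- ===== Notes on version B (the rewrite author's own statement) =====
-- stated objective: simpler
-- what changed: Replaces A's set-size pre-check plus Counter table plus comprehension with a single early-exit scan per term that keeps a set of qualifying words already seen and appends the term on the first qualifying duplicate.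
import Mathlib
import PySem

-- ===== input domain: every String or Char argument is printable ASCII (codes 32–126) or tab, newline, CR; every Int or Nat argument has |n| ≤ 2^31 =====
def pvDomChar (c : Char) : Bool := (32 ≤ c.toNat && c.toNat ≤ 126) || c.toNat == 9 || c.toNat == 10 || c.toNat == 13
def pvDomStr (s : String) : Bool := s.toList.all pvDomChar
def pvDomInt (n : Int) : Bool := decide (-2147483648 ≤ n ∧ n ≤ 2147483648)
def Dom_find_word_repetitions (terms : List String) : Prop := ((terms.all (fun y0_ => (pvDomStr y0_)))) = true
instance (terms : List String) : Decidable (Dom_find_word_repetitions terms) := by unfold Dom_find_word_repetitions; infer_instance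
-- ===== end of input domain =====

-- B replaces A's set-size pre-check + Counter + comprehension with a single early-exit scan per term (objective: simpler).

-- ===== PORT A =====
def find_word_repetitions (terms : List String) : List String :=
  terms.foldl (fun repeated term =>
    let words := PySem.Str.split₀ (PySem.Str.lower term)
    if PySem.Set.len (PySem.Set.ofList words) < (words.length : Int) then
      let word_counts := PySem.Dict.counter words
      let meaningful_reps :=
        ((word_counts.items.filter (fun kv =>
            decide (1 < kv.2) && decide (2 < PySem.Str.len kv.1) &&
            !(["the", "and", "or", "of", "in", "to"].contains kv.1))).map Prod.fst)
      if !meaningful_reps.isEmpty then repeated ++ [term] else repeated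
    else repeated) []

-- ===== PORT B =====
def pvStop : List String := ["the", "and", "or", "of", "in", "to"]

def pvQual (w : String) : Bool := decide (2 < PySem.Str.len w) && !(pvStop.contains w)

def pvScan : List String → PySem.Set String → Bool
  | [], _ => false
  | w :: ws, seen =>
    if pvQual w then
      if PySem.Set.contains seen w then true
      else pvScan ws (PySem.Set.add seen w)
    else pvScan ws seen

def find_word_repetitions_alt (terms : List String) : List String :=
  terms.filter (fun term => pvScan (PySem.Str.split₀ (PySem.Str.lower term)) PySem.Set.empty)

-- ===== PRECONDITION & SPEC =====
def Spec_find_word_repetitions (terms : List String) (out : List String) : Prop := out = find_word_repetitions_alt terms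
instance (terms : List String) (out : List String) : Decidable (Spec_find_word_repetitions terms out) := by unfold Spec_find_word_repetitions; infer_instance

-- ===== CLAIM (what is proved, stated in full; the proofs are below) =====
def Claim_equal_find_word_repetitions : Prop := ∀ (terms : List String), Dom_find_word_repetitions terms → Spec_find_word_repetitions terms (find_word_repetitions terms)

-- ===== LEMMAS AND PROOFS =====

-- A's per-term condition, named for the proofs
def pvCondA (term : String) : Bool :=
  let words := PySem.Str.split₀ (PySem.Str.lower term)
  if PySem.Set.len (PySem.Set.ofList words) < (words.length : Int) then
    (!(((PySem.Dict.counter words).items.filter (fun kv =>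
        decide (1 < kv.2) && decide (2 < PySem.Str.len kv.1) &&
        !(["the", "and", "or", "of", "in", "to"].contains kv.1))).map Prod.fst).isEmpty)
  else false

lemma contains_add_iff (s : PySem.Set String) (x y : String) :
    PySem.Set.contains (PySem.Set.add s x) y = true ↔ PySem.Set.contains s y = true ∨ y = x := by
  have h := PySem.Set.mem_add s x y
  constructor
  · intro hc
    have : y ∈ s.add x := by simpa [PySem.Set.contains] using hc
    rcases h.mp this with h1 | h1
    · left; simpa [PySem.Set.contains] using h1
    · exact Or.inr h1
  · intro hc
    have : y ∈ s.add x := h.mpr (by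
      rcases hc with h1 | h1
      · exact Or.inl (by simpa [PySem.Set.contains] using h1)
      · exact Or.inr h1)
    simpa [PySem.Set.contains] using this

lemma pvScan_iff (ws : List String) (seen : PySem.Set String) :
    pvScan ws seen = true ↔ ∃ w ∈ ws, pvQual w = true ∧ (PySem.Set.contains seen w = true ∨ 2 ≤ ws.count w) := by
  induction ws generalizing seen with
  | nil => simp [pvScan]
  | cons x xs ih =>
    have step : pvScan (x :: xs) seen =
        (if pvQual x = true then
          (if PySem.Set.contains seen x = true then true else pvScan xs (PySem.Set.add seen x))
        else pvScan xs seen) := rfl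
    by_cases hq : pvQual x = true
    case neg =>
      rw [step, if_neg hq, ih]
      constructor
      · rintro ⟨v, hv, hqv, hor⟩
        have hvx : v ≠ x := fun h => hq (h ▸ hqv)
        refine ⟨v, List.mem_cons_of_mem _ hv, hqv, ?_⟩
        rcases hor with h | h
        · exact Or.inl h
        · right; rw [List.count_cons_of_ne (Ne.symm hvx)]; exact h
      · rintro ⟨v, hv, hqv, hor⟩
        have hvx : v ≠ x := fun h => hq (h ▸ hqv)
        have hv' : v ∈ xs := by
          rcases List.mem_cons.mp hv with h | h
          · exact absurd h hvx
          · exact h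
        refine ⟨v, hv', hqv, ?_⟩
        rcases hor with h | h
        · exact Or.inl h
        · right; rw [List.count_cons_of_ne (Ne.symm hvx)] at h; exact h
    case pos =>
      by_cases hc : PySem.Set.contains seen x = true
      case pos =>
        rw [step, if_pos hq, if_pos hc]
        simp only [true_iff]
        exact ⟨x, by simp, hq, Or.inl hc⟩
      case neg =>
        rw [step, if_pos hq, if_neg hc, ih]
        constructor
        · rintro ⟨v, hv, hqv, hor⟩
          by_cases hvx : v = x
          · subst hvx
            refine ⟨v, by simp, hqv, Or.inr ?_⟩
            have h1 : 1 ≤ xs.count v := List.one_le_count_iff.mpr hv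
            rw [List.count_cons_self]; omega
          · refine ⟨v, List.mem_cons_of_mem _ hv, hqv, ?_⟩
            rcases hor with h | h
            · rcases (contains_add_iff seen x v).mp h with h1 | h1
              · exact Or.inl h1
              · exact absurd h1 hvx
            · right; rw [List.count_cons_of_ne (Ne.symm hvx)]; exact h
        · rintro ⟨v, hv, hqv, hor⟩
          by_cases hvx : v = x
          · subst hvx
            rcases hor with h | h
            · exact absurd h hc
            · have hv' : v ∈ xs := by
                apply List.one_le_count_iff.mp
                rw [List.count_cons_self] at h; omega
              exact ⟨v, hv', hqv, Or.inl ((contains_add_iff seen v v).mpr (Or.inr rfl))⟩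
          · have hv' : v ∈ xs := by
              rcases List.mem_cons.mp hv with h | h
              · exact absurd h hvx
              · exact h
            refine ⟨v, hv', hqv, ?_⟩
            rcases hor with h | h
            · exact Or.inl ((contains_add_iff seen x v).mpr (Or.inl h))
            · right; rw [List.count_cons_of_ne (Ne.symm hvx)] at h; exact h

lemma foldl_add_len_le (xs : List String) (s : PySem.Set String) :
    (List.foldl PySem.Set.add s xs).length ≤ s.length + xs.length := by
  induction xs generalizing s with
  | nil => simp
  | cons x xs ih =>
    simp only [List.foldl_cons, List.length_cons]
    have h1 := ih (PySem.Set.add s x)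
    have h2 : (PySem.Set.add s x).length ≤ s.length + 1 := by
      simp only [PySem.Set.add]; split
      · omega
      · simp
    omega

lemma foldl_add_len_lt (xs : List String) (s : PySem.Set String) (w : String)
    (hmem : w ∈ xs) (h : PySem.Set.contains s w = true ∨ 2 ≤ xs.count w) :
    (List.foldl PySem.Set.add s xs).length < s.length + xs.length := by
  induction xs generalizing s with
  | nil => cases hmem
  | cons x xs ih =>
    simp only [List.foldl_cons, List.length_cons]
    by_cases hcx : PySem.Set.contains s x = true
    · have hx : x ∈ s := by simpa [PySem.Set.contains] using hcx
      have hadd : PySem.Set.add s x = s := by simp [PySem.Set.add, PySem.Set.contains, hx]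
      rw [hadd]
      have := foldl_add_len_le xs s
      omega
    · have hx : x ∉ s := by simpa [PySem.Set.contains] using hcx
      have hlen : (PySem.Set.add s x).length = s.length + 1 := by
        simp [PySem.Set.add, PySem.Set.contains, hx]
      by_cases hwx : w = x
      · subst hwx
        rcases h with h | h
        · exact absurd h hcx
        · have hmem' : w ∈ xs := by
            apply List.one_le_count_iff.mp
            rw [List.count_cons_self] at h; omega
          have hc' : PySem.Set.contains (PySem.Set.add s w) w = true :=
            (contains_add_iff s w w).mpr (Or.inr rfl)
          have := ih (PySem.Set.add s w) hmem' (Or.inl hc')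
          omega
      · have hmem' : w ∈ xs := by
          rcases List.mem_cons.mp hmem with hh | hh
          · exact absurd hh hwx
          · exact hh
        have h' : PySem.Set.contains (PySem.Set.add s x) w = true ∨ 2 ≤ xs.count w := by
          rcases h with hh | hh
          · exact Or.inl ((contains_add_iff s x w).mpr (Or.inl hh))
          · right; rw [List.count_cons_of_ne (Ne.symm hwx)] at hh; exact hh
        have := ih (PySem.Set.add s x) hmem' h'
        omega

lemma condA_iff (words : List String) :
    ((if PySem.Set.len (PySem.Set.ofList words) < (words.length : Int) then
        (!(((PySem.Dict.counter words).items.filter (fun kv =>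
            decide (1 < kv.2) && decide (2 < PySem.Str.len kv.1) &&
            !(["the", "and", "or", "of", "in", "to"].contains kv.1))).map Prod.fst).isEmpty)
      else false) = true)
    ↔ ∃ w ∈ words, pvQual w = true ∧ 2 ≤ words.count w := by
  have hfilter : ((!(((PySem.Dict.counter words).items.filter (fun kv =>
          decide (1 < kv.2) && decide (2 < PySem.Str.len kv.1) &&
          !(["the", "and", "or", "of", "in", "to"].contains kv.1))).map Prod.fst).isEmpty) = true)
      ↔ ∃ w ∈ words, pvQual w = true ∧ 2 ≤ words.count w := by
    rw [PySem.Dict.items_counter]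
    rw [List.filter_map]
    have hne : ∀ (L : List String), ((!L.isEmpty) = true) ↔ L ≠ [] := fun L => by cases L <;> simp
    rw [hne]
    simp only [ne_eq, List.map_eq_nil_iff, List.filter_eq_nil_iff]
    push_neg
    constructor
    · rintro ⟨k, hk, hcond⟩
      rw [PySem.Set.mem_ofList] at hk
      simp only [Function.comp, Bool.and_eq_true, decide_eq_true_eq, Bool.not_eq_true',
        Int.lt_iff_add_one_le] at hcond
      refine ⟨k, hk, ?_, ?_⟩
      · simp only [pvQual, pvStop, Bool.and_eq_true, decide_eq_true_eq, Bool.not_eq_true']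
        exact ⟨hcond.1.2, hcond.2⟩
      · have := hcond.1.1
        exact_mod_cast this
    · rintro ⟨w, hmem, hq, hcnt⟩
      refine ⟨w, PySem.Set.mem_ofList words w |>.mpr hmem, ?_⟩
      simp only [pvQual, pvStop, Bool.and_eq_true, decide_eq_true_eq, Bool.not_eq_true'] at hq
      simp only [Function.comp, Bool.and_eq_true, decide_eq_true_eq, Bool.not_eq_true']
      exact ⟨⟨by exact_mod_cast hcnt, hq.1⟩, hq.2⟩
  constructor
  · intro h
    split at h
    · exact hfilter.mp h
    · exact absurd h Bool.false_ne_true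
  · intro h
    have hlt : PySem.Set.len (PySem.Set.ofList words) < (words.length : Int) := by
      obtain ⟨w, hmem, _, hcnt⟩ := h
      have hlt' := foldl_add_len_lt words PySem.Set.empty w hmem (Or.inr hcnt)
      simp only [PySem.Set.len, PySem.Set.ofList, PySem.Set.empty, List.length_nil, Nat.zero_add] at hlt' ⊢
      exact_mod_cast hlt'
    rw [if_pos hlt]
    exact hfilter.mpr h


lemma pvScan_empty_iff (ws : List String) :
    pvScan ws PySem.Set.empty = true ↔ ∃ w ∈ ws, pvQual w = true ∧ 2 ≤ ws.count w := by
  rw [pvScan_iff]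
  constructor
  · rintro ⟨w, hm, hq, hor⟩
    refine ⟨w, hm, hq, ?_⟩
    rcases hor with h | h
    · simp [PySem.Set.empty, PySem.Set.contains] at h
    · exact h
  · rintro ⟨w, hm, hq, hc⟩
    exact ⟨w, hm, hq, Or.inr hc⟩

lemma cond_eq (term : String) :
    pvCondA term = pvScan (PySem.Str.split₀ (PySem.Str.lower term)) PySem.Set.empty := by
  rw [Bool.eq_iff_iff]
  rw [pvScan_empty_iff]
  exact condA_iff (PySem.Str.split₀ (PySem.Str.lower term))

lemma bodyEq (acc : List String) (term : String) :
    (let words := PySem.Str.split₀ (PySem.Str.lower term)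
     if PySem.Set.len (PySem.Set.ofList words) < (words.length : Int) then
       let word_counts := PySem.Dict.counter words
       let meaningful_reps :=
         ((word_counts.items.filter (fun kv =>
             decide (1 < kv.2) && decide (2 < PySem.Str.len kv.1) &&
             !(["the", "and", "or", "of", "in", "to"].contains kv.1))).map Prod.fst)
       if !meaningful_reps.isEmpty then acc ++ [term] else acc
     else acc)
    = (if pvCondA term = true then acc ++ [term] else acc) := by
  simp only [pvCondA]
  by_cases hc : PySem.Set.len (PySem.Set.ofList (PySem.Str.split₀ (PySem.Str.lower term))) <
      ((PySem.Str.split₀ (PySem.Str.lower term)).length : Int)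
  · simp only [if_pos hc]
  · simp only [if_neg hc, Bool.false_eq_true, if_false]

lemma foldl_filterA (terms acc : List String) :
    terms.foldl (fun repeated term =>
      let words := PySem.Str.split₀ (PySem.Str.lower term)
      if PySem.Set.len (PySem.Set.ofList words) < (words.length : Int) then
        let word_counts := PySem.Dict.counter words
        let meaningful_reps :=
          ((word_counts.items.filter (fun kv =>
              decide (1 < kv.2) && decide (2 < PySem.Str.len kv.1) &&
              !(["the", "and", "or", "of", "in", "to"].contains kv.1))).map Prod.fst)
        if !meaningful_reps.isEmpty then repeated ++ [term] else repeated
      else repeated) acc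
    = acc ++ terms.filter (fun t => pvCondA t) := by
  induction terms generalizing acc with
  | nil => simp
  | cons t ts ih =>
    rw [List.foldl_cons, bodyEq, ih, List.filter_cons]
    by_cases h : pvCondA t = true
    · simp [h]
    · simp [h]

-- ===== VERDICT (by name: the statement is the Claim_ definition above) =====
theorem find_word_repetitions_spec : Claim_equal_find_word_repetitions := by
  intro terms _
  unfold Spec_find_word_repetitions find_word_repetitions_alt find_word_repetitions
  rw [foldl_filterA, List.nil_append]
  apply List.filter_congr
  intro term _
  exact cond_eq term
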